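-- pv_equiv track=rewrite | github.com/facebook/sapling | eden/scm/sapling/cmdutil.py | _parse_commit_message
-- ===== SOURCE A (Python) =====
-- from typing import Dict, List, Optional, Set, Tuple
--
-- def _parse_commit_message(
--     lines: List[str], commit_fields: Set[str]
-- ) -> List[Tuple[Optional[str], List[str]]]:
--     """Parse commit message lines and return list of (field, content_lines) pairs.
--
--     >>> _parse_commit_message(["this is a title"], {"Summary"})
--     [(None, ['this is a title'])]
--     >>> _parse_commit_message(
--     ...   ['this is a title', '', 'Summary: I am a summary'],
--     ...   {'Summary', 'Test Plan'},
--     ... )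
--     [(None, ['this is a title', '']), ('Summary', ['Summary: I am a summary'])]
--     >>> _parse_commit_message(
--     ...   ["this is a title", "", "Summary: I am a summary", "", "Test Plan: I am a test plan"],
--     ...   {"Summary", "Test Plan"},
--     ... )
--     [(None, ['this is a title', '']), ('Summary', ['Summary: I am a summary', '']), ('Test Plan', ['Test Plan: I am a test plan'])]
--     """
--     result = []
--     curr_key, curr_content = None, []
--     for line in lines:
--         try:
--             key = line[: line.index(":")]
--         except ValueError:
--             # not found ":"
--             curr_content.append(line)
--             continue
--
--         if key in commit_fields:
--             if curr_content:
--                 result.append((curr_key, curr_content))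
--             curr_key, curr_content = key, [line]
--         else:
--             curr_content.append(line)
--
--     if curr_content:
--         result.append((curr_key, curr_content))
--     return result
-- ===== SOURCE B (Python) =====
-- def _parse_commit_message(lines, commit_fields):
--     def field_key(line):
--         j = line.find(":")
--         if j != -1 and line[:j] in commit_fields:
--             return line[:j]
--         return None
--
--     result = []
--     rest = lines
--     while rest:
--         head, tail = rest[0], rest[1:]
--         k = 0
--         while k < len(tail) and field_key(tail[k]) is None:
--             k += 1
--         result.append((field_key(head), [head] + tail[:k]))
--         rest = tail[k:]
--     return result
-- ===== Notes on version B (the rewrite author's own statement) =====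
-- stated objective: alternative
-- what changed: Replaces A's accumulator fold (curr_key/curr_content buffer flushed on each field line and at the end) with a greedy chunking scan: each step emits one whole segment (its head line's field key, or None, plus the run of following non-field lines) and jumps to the next field line, so no buffer or flush logic exists.
import Mathlib
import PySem

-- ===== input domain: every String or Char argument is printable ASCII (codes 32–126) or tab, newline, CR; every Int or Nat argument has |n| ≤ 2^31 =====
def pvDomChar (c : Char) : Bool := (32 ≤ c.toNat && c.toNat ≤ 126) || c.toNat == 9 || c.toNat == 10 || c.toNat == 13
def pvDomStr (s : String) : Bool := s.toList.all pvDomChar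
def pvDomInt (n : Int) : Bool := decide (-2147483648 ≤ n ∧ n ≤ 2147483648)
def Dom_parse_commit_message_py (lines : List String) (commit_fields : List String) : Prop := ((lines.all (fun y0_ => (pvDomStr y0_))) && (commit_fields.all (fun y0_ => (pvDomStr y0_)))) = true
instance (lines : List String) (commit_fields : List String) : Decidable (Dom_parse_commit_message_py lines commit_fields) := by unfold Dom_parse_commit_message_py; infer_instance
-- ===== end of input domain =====

-- B replaces A's curr_key/curr_content accumulator-and-flush loop with a greedy chunking
-- scan that emits one whole segment per step (alternative decomposition, same cost).

-- ===== PORT A =====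
-- one iteration of A's for-loop: state = (result, curr_key, curr_content)
-- j = line.index(":") (find = -1 is the caught ValueError); key = line[:j], written inline
def pvStepA (cf : List String)
    (s : List (Option String × List String) × Option String × List String)
    (line : String) : List (Option String × List String) × Option String × List String :=
  if PySem.Str.find line ":" = -1 then
    -- except ValueError: curr_content.append(line); continue
    (s.1, s.2.1, s.2.2 ++ [line])
  else if cf.contains (PySem.Str.slice line none (some (PySem.Str.find line ":"))) then
    ((if s.2.2 = [] then s.1 else s.1 ++ [(s.2.1, s.2.2)]),
      some (PySem.Str.slice line none (some (PySem.Str.find line ":"))), [line])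
  else
    (s.1, s.2.1, s.2.2 ++ [line])

def parse_commit_message_py (lines : List String) (commit_fields : List String) :
    List (Option String × List String) :=
  let st := lines.foldl (pvStepA commit_fields) ([], none, [])
  if st.2.2 = [] then st.1 else st.1 ++ [(st.2.1, st.2.2)]

-- ===== PORT B =====
-- field_key: some key if the line starts a recognised field, else none
def pvFieldKey (cf : List String) (line : String) : Option String :=
  if PySem.Str.find line ":" ≠ -1 ∧
      cf.contains (PySem.Str.slice line none (some (PySem.Str.find line ":"))) then
    some (PySem.Str.slice line none (some (PySem.Str.find line ":")))
  else none

-- the outer while loop on `rest`; the inner index loop computing k is the run of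
-- leading non-field lines of `tail`, i.e. tail[:k] = takeWhile, tail[k:] = dropWhile
def pvAltGo (cf : List String) : List String → List (Option String × List String)
  | [] => []
  | head :: tail =>
      (pvFieldKey cf head, head :: tail.takeWhile (fun x => (pvFieldKey cf x).isNone))
        :: pvAltGo cf (tail.dropWhile (fun x => (pvFieldKey cf x).isNone))
termination_by ls => ls.length
decreasing_by
  simp only [List.length_cons]
  exact Nat.lt_succ_of_le (List.length_dropWhile_le _ _)

def parse_commit_message_py_alt (lines : List String) (commit_fields : List String) :
    List (Option String × List String) :=
  pvAltGo commit_fields lines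

-- ===== PRECONDITION & SPEC =====
def Spec_parse_commit_message_py (lines : List String) (commit_fields : List String) (out : List (Option String × List String)) : Prop := out = parse_commit_message_py_alt lines commit_fields
instance (lines : List String) (commit_fields : List String) (out : List (Option String × List String)) : Decidable (Spec_parse_commit_message_py lines commit_fields out) := by unfold Spec_parse_commit_message_py; infer_instance

-- ===== CLAIM (what is proved, stated in full; the proofs are below) =====
def Claim_equal_parse_commit_message_py : Prop := ∀ (lines : List String) (commit_fields : List String), Dom_parse_commit_message_py lines commit_fields → Spec_parse_commit_message_py lines commit_fields (parse_commit_message_py lines commit_fields)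

-- ===== LEMMAS AND PROOFS =====

-- A's step appends `line` to curr_content exactly when B's field_key is none
lemma pvStepA_of_none {cf : List String} {line : String}
    (h : pvFieldKey cf line = none)
    (s : List (Option String × List String) × Option String × List String) :
    pvStepA cf s line = (s.1, s.2.1, s.2.2 ++ [line]) := by
  unfold pvFieldKey at h
  unfold pvStepA
  by_cases h1 : PySem.Str.find line ":" = -1
  · rw [if_pos h1]
  · rw [if_neg h1]
    split at h
    · cases h
    · next hc =>
        split
        · next hcon => exact absurd ⟨h1, hcon⟩ hc
        · rfl

lemma pvStepA_of_some {cf : List String} {line key : String}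
    (h : pvFieldKey cf line = some key)
    (s : List (Option String × List String) × Option String × List String) :
    pvStepA cf s line =
      ((if s.2.2 = [] then s.1 else s.1 ++ [(s.2.1, s.2.2)]), some key, [line]) := by
  unfold pvFieldKey at h
  unfold pvStepA
  split at h
  · next hc =>
      obtain ⟨h1, h2⟩ := hc
      cases h
      rw [if_neg (by simpa using h1), if_pos h2]
  · cases h

-- the finalize step of A
def pvFinishA (st : List (Option String × List String) × Option String × List String) :
    List (Option String × List String) :=
  if st.2.2 = [] then st.1 else st.1 ++ [(st.2.1, st.2.2)]

-- invariant: while curr_content is nonempty, the rest of A's run produces the current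
-- open segment (closed off by the next field line's takeWhile run) followed by B's chunks
lemma pvLoopA_eq (cf : List String) (ls : List String) :
    ∀ (res : List (Option String × List String)) (ck : Option String) (cc : List String),
    cc ≠ [] →
    pvFinishA (ls.foldl (pvStepA cf) (res, ck, cc)) =
      res ++ (ck, cc ++ ls.takeWhile (fun x => (pvFieldKey cf x).isNone))
        :: pvAltGo cf (ls.dropWhile (fun x => (pvFieldKey cf x).isNone)) := by
  induction ls with
  | nil =>
      intro res ck cc hcc
      simp [pvFinishA, pvAltGo, hcc]
  | cons l ls ih =>
      intro res ck cc hcc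
      cases hk : pvFieldKey cf l with
      | none =>
          simp only [List.foldl_cons, pvStepA_of_none hk]
          rw [ih res ck (cc ++ [l]) (by simp)]
          simp [hk]
      | some key =>
          simp only [List.foldl_cons, pvStepA_of_some hk]
          rw [if_neg hcc, ih (res ++ [(ck, cc)]) (some key) [l] (by simp)]
          simp [pvAltGo, hk]

-- ===== VERDICT (by name: the statement is the Claim_ definition above) =====
theorem parse_commit_message_py_spec : Claim_equal_parse_commit_message_py := by
  intro lines cf _
  show parse_commit_message_py lines cf = parse_commit_message_py_alt lines cf
  cases lines with
  | nil => simp [parse_commit_message_py, parse_commit_message_py_alt, pvAltGo]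
  | cons l ls =>
      show pvFinishA ((l :: ls).foldl (pvStepA cf) ([], none, [])) = pvAltGo cf (l :: ls)
      cases hk : pvFieldKey cf l with
      | none =>
          simp only [List.foldl_cons, pvStepA_of_none hk, List.nil_append]
          rw [pvLoopA_eq cf ls [] none [l] (by simp)]
          simp [pvAltGo, hk]
      | some key =>
          simp only [List.foldl_cons, pvStepA_of_some hk, reduceIte, List.nil_append]
          rw [pvLoopA_eq cf ls [] (some key) [l] (by simp)]
          simp [pvAltGo, hk]
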